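-- pv_equiv track=rewrite | github.com/hitochan777/kata | atcoder/code-festival-2014-final/C.py | f
-- ===== SOURCE A (Python) =====
-- def f(n):
--   weight = n
--   d = 1
--   total = 0
--   while n > 0:
--     total += d * (n % 10)
--     n //= 10
--     d *= weight
--
--   return total
-- ===== SOURCE B (Python) =====
-- def f(n):
--     # Horner evaluation, most-significant digit first, by recursion on n // 10.
--     if n <= 0:
--         return 0
--
--     def horner(m):
--         return 0 if m == 0 else horner(m // 10) * n + m % 10
--
--     return horner(n)
-- ===== Notes on version B (the rewrite author's own statement) =====
-- stated objective: alternative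
-- what changed: Replaces A's least-significant-first loop that maintains an explicit power accumulator d with a most-significant-first Horner recursion on successive decimal quotients that keeps a single value and no power variable.
import Mathlib
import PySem

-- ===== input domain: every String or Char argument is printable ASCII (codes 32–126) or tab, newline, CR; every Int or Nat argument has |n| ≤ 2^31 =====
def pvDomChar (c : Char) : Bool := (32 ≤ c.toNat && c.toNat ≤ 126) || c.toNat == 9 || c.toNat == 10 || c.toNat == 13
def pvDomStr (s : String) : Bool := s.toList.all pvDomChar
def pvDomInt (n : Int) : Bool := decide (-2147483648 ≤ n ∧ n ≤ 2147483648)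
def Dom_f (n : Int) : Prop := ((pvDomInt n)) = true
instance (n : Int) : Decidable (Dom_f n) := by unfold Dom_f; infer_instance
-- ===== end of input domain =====

-- B replaces A's least-significant-first loop with an explicit power accumulator by a
-- most-significant-first Horner recursion on the decimal quotient (alternative decomposition, same cost).


-- ===== PORT A =====
-- the while loop: state (n, d, total), weight fixed
def fLoop (weight n d total : Int) : Int :=
  if 0 < n then
    fLoop weight (PySem.Int.floordiv n 10) (d * weight) (total + d * PySem.Int.mod n 10)
  else total
termination_by n.toNat
decreasing_by
  rw [PySem.Int.floordiv_eq_ediv_of_pos (by norm_num : (0:Int) < 10)]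
  omega

def f (n : Int) : Int := fLoop n n 1 0

-- ===== PORT B =====
-- horner(m) = 0 if m == 0 else horner(m // 10) * n + m % 10; only ever invoked with m ≥ 0
-- (f_alt calls it with n > 0), so the recursion is carried out on the Nat m.toNat, where
-- m // 10 and m % 10 are Nat division/remainder (exact: Python's // and % on nonnegatives).
def hornerB (weight : Int) (m : Nat) : Int :=
  if m = 0 then 0 else hornerB weight (m / 10) * weight + (m % 10 : Nat)
termination_by m
decreasing_by omega

def f_alt (n : Int) : Int := if n ≤ 0 then 0 else hornerB n n.toNat

-- ===== PRECONDITION & SPEC =====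
def Spec_f (n : Int) (out : Int) : Prop := out = f_alt n
instance (n : Int) (out : Int) : Decidable (Spec_f n out) := by unfold Spec_f; infer_instance

-- ===== CLAIM (what is proved, stated in full; the proofs are below) =====
def Claim_equal_f : Prop := ∀ (n : Int), Dom_f n → Spec_f n (f n)

-- ===== LEMMAS AND PROOFS =====
theorem fLoop_eq_horner (weight : Int) (m : Nat) (d total : Int) :
    fLoop weight (m : Int) d total = total + d * hornerB weight m := by
  induction m using Nat.strong_induction_on generalizing d total with
  | _ m ih =>
    rw [fLoop, hornerB]
    by_cases hm : m = 0
    · subst hm; simp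
    · have hpos : 0 < (m : Int) := by omega
      rw [if_pos hpos, if_neg hm]
      have h1 : PySem.Int.floordiv (m : Int) 10 = ((m / 10 : Nat) : Int) := by
        exact_mod_cast PySem.Int.floordiv_natCast m 10
      have h2 : PySem.Int.mod (m : Int) 10 = ((m % 10 : Nat) : Int) := by
        exact_mod_cast PySem.Int.mod_natCast m 10
      rw [h1, h2]
      rw [ih (m / 10) (by omega)]
      ring

theorem f_spec' (n : Int) : f n = f_alt n := by
  unfold f f_alt
  by_cases h : n ≤ 0
  · rw [fLoop, if_neg (by omega), if_pos h]
  · rw [if_neg h]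
    have hn : n = ((n.toNat : Nat) : Int) := by omega
    calc fLoop n n 1 0 = fLoop n ((n.toNat : Nat) : Int) 1 0 := by rw [← hn]
      _ = 0 + 1 * hornerB n n.toNat := fLoop_eq_horner n n.toNat 1 0
      _ = hornerB n n.toNat := by ring

-- ===== VERDICT (by name: the statement is the Claim_ definition above) =====
theorem f_spec : Claim_equal_f := by
  intro n _
  exact f_spec' n
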